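-- pv_equiv track=rewrite | github.com/sai01c/Neet150 | 14. Math&Geometry/Contest/SumOfMatrixAfterQueries.py | matrixSumQueries
-- ===== SOURCE A (Python) =====
-- def matrixSumQueries(n, queries) -> int:
--     rows = set()
--     cols = set()
--     res = 0
--
--     for i in range(len(queries)-1, -1, -1):
--         typ, ind, val = queries[i]
--         if typ == 0 and ind not in rows:
--             rows.add(ind)
--             res += (val * (n-len(cols)))
--         elif typ == 1 and ind not in cols:
--             cols.add(ind)
--             res += (val * (n-len(rows)))
--
--     return res
-- ===== SOURCE B (Python) =====
-- def matrixSumQueries(n, queries) -> int: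
--     # Forward two-pass: record the last write index per row/col, then sweep
--     # forward adding each final write's contribution.
--     last_row = {}
--     last_col = {}
--     for i, (typ, ind, val) in enumerate(queries):
--         if typ == 0:
--             last_row[ind] = i
--         elif typ == 1:
--             last_col[ind] = i
--     nr, nc = len(last_row), len(last_col)
--     res = 0
--     rs = 0
--     cs = 0
--     for i, (typ, ind, val) in enumerate(queries):
--         if typ == 0 and last_row.get(ind) == i:
--             res += val * (n - nc + cs)
--             rs += 1
--         elif typ == 1 and last_col.get(ind) == i:
--             res += val * (n - nr + rs)
--             cs += 1
--     return res
-- ===== Notes on version B (the rewrite author's own statement) =====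
-- stated objective: alternative
-- what changed: Replaces A's single reverse pass over two 'already seen' index sets by a forward two-pass algorithm: one pass records the last write index of every row/column in two dicts, a second forward pass adds each final write's contribution using running counts of finals already passed.
import Mathlib
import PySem

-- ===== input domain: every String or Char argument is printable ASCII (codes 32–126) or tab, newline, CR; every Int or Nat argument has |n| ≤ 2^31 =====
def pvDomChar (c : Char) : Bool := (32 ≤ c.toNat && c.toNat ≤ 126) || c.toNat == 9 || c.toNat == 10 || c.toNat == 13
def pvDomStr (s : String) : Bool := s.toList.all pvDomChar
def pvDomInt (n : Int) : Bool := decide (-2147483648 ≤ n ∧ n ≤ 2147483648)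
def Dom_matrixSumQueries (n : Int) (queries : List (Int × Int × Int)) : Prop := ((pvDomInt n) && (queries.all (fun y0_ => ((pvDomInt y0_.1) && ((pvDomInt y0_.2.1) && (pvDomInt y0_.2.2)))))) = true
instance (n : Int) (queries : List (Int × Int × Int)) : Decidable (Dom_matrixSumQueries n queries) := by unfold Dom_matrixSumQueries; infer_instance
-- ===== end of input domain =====

-- B replaces A's reverse pass over two seen-sets by a forward two-pass sweep
-- (last-write-index dicts, then forward accumulation); objective: alternative.

-- ===== PORT A =====
-- loop body of A's `for i in range(len(queries)-1, -1, -1)` loop (state = (rows, cols, res))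
def pvAStep (n : Int) (st : PySem.Set Int × PySem.Set Int × Int) (q : Int × Int × Int) :
    PySem.Set Int × PySem.Set Int × Int :=
  if q.1 == 0 && !(PySem.Set.contains st.1 q.2.1) then
    (PySem.Set.add st.1 q.2.1, st.2.1, st.2.2 + q.2.2 * (n - PySem.Set.len st.2.1))
  else if q.1 == 1 && !(PySem.Set.contains st.2.1 q.2.1) then
    (st.1, PySem.Set.add st.2.1 q.2.1, st.2.2 + q.2.2 * (n - PySem.Set.len st.1))
  else st

def matrixSumQueries (n : Int) (queries : List (Int × Int × Int)) : Int :=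
  (queries.reverse.foldl (pvAStep n) (PySem.Set.empty, PySem.Set.empty, 0)).2.2

-- ===== PORT B =====
-- first pass of B: record the last write index per row ind / per col ind
def pvBLastStep (st : PySem.Dict Int Int × PySem.Dict Int Int) (p : Int × Int × Int × Int) :
    PySem.Dict Int Int × PySem.Dict Int Int :=
  if p.2.1 == 0 then (st.1.insert p.2.2.1 p.1, st.2)
  else if p.2.1 == 1 then (st.1, st.2.insert p.2.2.1 p.1)
  else st

-- second pass of B (state = (res, rs, cs))
def pvBSweepStep (n nr nc : Int) (dR dC : PySem.Dict Int Int) (st : Int × Int × Int)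
    (p : Int × Int × Int × Int) : Int × Int × Int :=
  if p.2.1 == 0 && (dR.get? p.2.2.1 == some p.1) then
    (st.1 + p.2.2.2 * (n - nc + st.2.2), st.2.1 + 1, st.2.2)
  else if p.2.1 == 1 && (dC.get? p.2.2.1 == some p.1) then
    (st.1 + p.2.2.2 * (n - nr + st.2.1), st.2.1, st.2.2 + 1)
  else st

def matrixSumQueries_alt (n : Int) (queries : List (Int × Int × Int)) : Int :=
  let lasts := (PySem.List.enumerate queries).foldl pvBLastStep (PySem.Dict.empty, PySem.Dict.empty)
  let nr : Int := (PySem.Dict.size lasts.1 : Int)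
  let nc : Int := (PySem.Dict.size lasts.2 : Int)
  ((PySem.List.enumerate queries).foldl (pvBSweepStep n nr nc lasts.1 lasts.2) (0, 0, 0)).1

-- ===== PRECONDITION & SPEC =====
def Spec_matrixSumQueries (n : Int) (queries : List (Int × Int × Int)) (out : Int) : Prop := out = matrixSumQueries_alt n queries
instance (n : Int) (queries : List (Int × Int × Int)) (out : Int) : Decidable (Spec_matrixSumQueries n queries out) := by unfold Spec_matrixSumQueries; infer_instance

-- ===== CLAIM (what is proved, stated in full; the proofs are below) =====
def Claim_equal_matrixSumQueries : Prop := ∀ (n : Int) (queries : List (Int × Int × Int)), Dom_matrixSumQueries n queries → Spec_matrixSumQueries n queries (matrixSumQueries n queries)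

-- ===== LEMMAS AND PROOFS =====

-- inds of type-t queries, in order
def pvInds (t : Int) (qs : List (Int × Int × Int)) : List Int :=
  (qs.filter (fun q => q.1 == t)).map (fun q => q.2.1)

-- number of distinct type-t inds
def pvCnt (t : Int) (qs : List (Int × Int × Int)) : Nat :=
  (PySem.Set.ofList (pvInds t qs)).length

-- the common value: contribution of each query that is the last type-t write to its ind
def pvF (n : Int) : List (Int × Int × Int) → Int
  | [] => 0
  | q :: qs => pvF n qs +
      (if q.1 = 0 ∧ q.2.1 ∉ pvInds 0 qs then q.2.2 * (n - (pvCnt 1 qs : Int))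
       else if q.1 = 1 ∧ q.2.1 ∉ pvInds 1 qs then q.2.2 * (n - (pvCnt 0 qs : Int))
       else 0)

-- relative index (from the front) of the last type-t write to ind, if any
def pvLast (t ind : Int) : List (Int × Int × Int) → Option Int
  | [] => none
  | q :: qs => match pvLast t ind qs with
    | some j => some (j + 1)
    | none => if q.1 = t ∧ q.2.1 = ind then some 0 else none

lemma pvInds_cons (t : Int) (q : Int × Int × Int) (qs : List (Int × Int × Int)) :
    pvInds t (q :: qs) = if q.1 = t then q.2.1 :: pvInds t qs else pvInds t qs := by
  by_cases h : q.1 = t <;> simp [pvInds, h]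


lemma pvLast_nonneg (t ind : Int) : ∀ qs j, pvLast t ind qs = some j → 0 ≤ j := by
  intro qs
  induction qs with
  | nil => intro j h; simp [pvLast] at h
  | cons q qs ih =>
    intro j h
    simp only [pvLast] at h
    rcases hq : pvLast t ind qs with _ | m
    · rw [hq] at h
      split_ifs at h with hc
      simp at h; omega
    · rw [hq] at h; simp at h
      have := ih m hq; omega

lemma pvLast_eq_none_iff (t ind : Int) (qs : List (Int × Int × Int)) :
    pvLast t ind qs = none ↔ ind ∉ pvInds t qs := by
  induction qs with
  | nil => simp [pvLast, pvInds]
  | cons q qs ih =>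
    rw [pvInds_cons]
    simp only [pvLast]
    rcases h : pvLast t ind qs with _ | m
    · rw [h] at ih
      have hnm : ind ∉ pvInds t qs := ih.mp rfl
      by_cases hq : q.1 = t
      · by_cases he : q.2.1 = ind
        · simp [hq, he, hnm]
        · simp [hq, he, hnm, Ne.symm he]
      · simp [hq, hnm]
    · have hm : ind ∈ pvInds t qs := by
        by_contra hc
        rw [ih.mpr hc] at h; simp at h
      by_cases hq : q.1 = t <;> simp [hq, hm]

lemma pvLast_cons_succ (t ind : Int) (q : Int × Int × Int) (qs : List (Int × Int × Int))
    (j : Int) (hj : 0 ≤ j) :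
    pvLast t ind (q :: qs) = some (j + 1) ↔ pvLast t ind qs = some j := by
  simp only [pvLast]
  rcases h : pvLast t ind qs with _ | m
  · constructor
    · intro hh
      split_ifs at hh with hc
      simp at hh; omega
    · intro hh; simp at hh
  · simp only [Option.some.injEq]
    constructor
    · intro hh; omega
    · intro hh; omega

lemma pvLast_cons_zero (t ind : Int) (q : Int × Int × Int) (qs : List (Int × Int × Int)) :
    pvLast t ind (q :: qs) = some 0 ↔ (pvLast t ind qs = none ∧ q.1 = t ∧ q.2.1 = ind) := by
  simp only [pvLast]
  rcases h : pvLast t ind qs with _ | m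
  · split_ifs with hc
    · simp [hc]
    · simp [hc]
  · have := pvLast_nonneg t ind qs m h
    simp only [Option.some.injEq]
    constructor
    · intro hh; omega
    · rintro ⟨hh, -⟩; simp at hh

lemma pv_len_eq {s t : List Int} (hs : s.Nodup) (ht : t.Nodup) (h : ∀ x, x ∈ s ↔ x ∈ t) :
    s.length = t.length :=
  List.Perm.length_eq ((List.perm_ext_iff_of_nodup hs ht).mpr h)

lemma pvCnt_cons (t : Int) (q : Int × Int × Int) (qs : List (Int × Int × Int)) :
    pvCnt t (q :: qs) = pvCnt t qs + (if q.1 = t ∧ q.2.1 ∉ pvInds t qs then 1 else 0) := by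
  unfold pvCnt
  rw [pvInds_cons]
  by_cases hq : q.1 = t
  · rw [if_pos hq]
    by_cases hm : q.2.1 ∈ pvInds t qs
    · rw [if_neg (by tauto)]
      have := pv_len_eq (s := PySem.Set.ofList (q.2.1 :: pvInds t qs))
        (t := PySem.Set.ofList (pvInds t qs))
        (PySem.Set.nodup_ofList _) (PySem.Set.nodup_ofList _) (by
          intro y
          simp only [PySem.Set.mem_ofList, List.mem_cons]
          constructor
          · rintro (rfl | hy)
            · exact hm
            · exact hy
          · tauto)
      omega
    · rw [if_pos ⟨hq, hm⟩]
      have hnd : (q.2.1 :: PySem.Set.ofList (pvInds t qs)).Nodup := by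
        refine List.nodup_cons.mpr ⟨?_, PySem.Set.nodup_ofList _⟩
        rw [PySem.Set.mem_ofList]; exact hm
      have := pv_len_eq (s := PySem.Set.ofList (q.2.1 :: pvInds t qs))
        (t := q.2.1 :: PySem.Set.ofList (pvInds t qs))
        (PySem.Set.nodup_ofList _) hnd (by
          intro y
          simp [PySem.Set.mem_ofList])
      rw [this]
      simp
  · rw [if_neg hq, if_neg (by tauto)]
    omega

-- ===== A = pvF =====
lemma pvA_len_row {rows : List Int} (t : Int) (qs : List (Int × Int × Int))
    (hnd : rows.Nodup) (hm : ∀ x, x ∈ rows ↔ x ∈ pvInds t qs) :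
    PySem.Set.len rows = (pvCnt t qs : Int) := by
  have : rows.length = pvCnt t qs := by
    apply pv_len_eq hnd (PySem.Set.nodup_ofList _)
    intro x
    rw [hm x, PySem.Set.mem_ofList]
  simp [PySem.Set.len, this]

lemma pvA_inv (n : Int) (qs : List (Int × Int × Int)) :
    (qs.foldr (fun q st => pvAStep n st q) (PySem.Set.empty, PySem.Set.empty, 0)).1.Nodup ∧
    (∀ x, x ∈ (qs.foldr (fun q st => pvAStep n st q) (PySem.Set.empty, PySem.Set.empty, 0)).1 ↔ x ∈ pvInds 0 qs) ∧
    (qs.foldr (fun q st => pvAStep n st q) (PySem.Set.empty, PySem.Set.empty, 0)).2.1.Nodup ∧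
    (∀ x, x ∈ (qs.foldr (fun q st => pvAStep n st q) (PySem.Set.empty, PySem.Set.empty, 0)).2.1 ↔ x ∈ pvInds 1 qs) ∧
    (qs.foldr (fun q st => pvAStep n st q) (PySem.Set.empty, PySem.Set.empty, 0)).2.2 = pvF n qs := by
  induction qs with
  | nil =>
    refine ⟨?_, ?_, ?_, ?_, ?_⟩ <;> simp [PySem.Set.empty, pvInds, pvF]
  | cons q qs ih =>
    rw [List.foldr_cons]
    rcases hst : (qs.foldr (fun q st => pvAStep n st q) (PySem.Set.empty, PySem.Set.empty, 0)) with ⟨rows, cols, res⟩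
    rw [hst] at ih
    obtain ⟨hnr, hmr, hnc, hmc, hres⟩ := ih
    dsimp only at hnr hmr hnc hmc hres
    by_cases h0 : q.1 = 0
    · by_cases hm : q.2.1 ∈ pvInds 0 qs
      · have hmem : q.2.1 ∈ rows := (hmr _).mpr hm
        have hstep : pvAStep n (rows, cols, res) q = (rows, cols, res) := by
          simp [pvAStep, h0, hmem]
        rw [hstep]
        refine ⟨hnr, ?_, hnc, ?_, ?_⟩
        · intro x
          rw [pvInds_cons, if_pos h0, List.mem_cons, hmr x]
          constructor
          · intro hx; exact Or.inr hx
          · rintro (rfl | hx)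
            · exact hm
            · exact hx
        · intro x
          rw [pvInds_cons, if_neg (by omega)]
          exact hmc x
        · rw [hres]
          simp only [pvF]
          rw [if_neg (by tauto), if_neg (by rintro ⟨hh, -⟩; omega)]
          ring
      · have hmem : q.2.1 ∉ rows := fun hx => hm ((hmr _).mp hx)
        have hstep : pvAStep n (rows, cols, res) q
            = (rows ++ [q.2.1], cols, res + q.2.2 * (n - cols.length)) := by
          simp [pvAStep, h0, hmem, PySem.Set.len]
        rw [hstep]
        refine ⟨?_, ?_, hnc, ?_, ?_⟩
        · rw [List.nodup_append]
          refine ⟨hnr, by simp, ?_⟩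
          intro a ha b hb
          simp only [List.mem_singleton] at hb
          subst hb
          exact fun hEq => hmem (hEq ▸ ha)
        · intro x
          rw [pvInds_cons, if_pos h0]
          simp only [List.mem_append, List.mem_cons, hmr x]
          tauto
        · intro x
          rw [pvInds_cons, if_neg (by omega)]
          exact hmc x
        · have hlen : (cols.length : Int) = (pvCnt 1 qs : Int) := by
            have := pvA_len_row 1 qs hnc hmc
            simpa [PySem.Set.len] using this
          simp only [pvF]
          rw [if_pos ⟨h0, hm⟩, hres, hlen]
    · by_cases h1 : q.1 = 1
      · by_cases hm : q.2.1 ∈ pvInds 1 qs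
        · have hmem : q.2.1 ∈ cols := (hmc _).mpr hm
          have hstep : pvAStep n (rows, cols, res) q = (rows, cols, res) := by
            simp [pvAStep, h1, hmem]
          rw [hstep]
          refine ⟨hnr, ?_, hnc, ?_, ?_⟩
          · intro x
            rw [pvInds_cons, if_neg (by omega)]
            exact hmr x
          · intro x
            rw [pvInds_cons, if_pos h1, List.mem_cons, hmc x]
            constructor
            · intro hx; exact Or.inr hx
            · rintro (rfl | hx)
              · exact hm
              · exact hx
          · rw [hres]
            simp only [pvF]
            rw [if_neg (by rintro ⟨hh, -⟩; omega), if_neg (by tauto)]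
            ring
        · have hmem : q.2.1 ∉ cols := fun hx => hm ((hmc _).mp hx)
          have hstep : pvAStep n (rows, cols, res) q
              = (rows, cols ++ [q.2.1], res + q.2.2 * (n - rows.length)) := by
            simp [pvAStep, h1, hmem, PySem.Set.len]
          rw [hstep]
          refine ⟨hnr, ?_, ?_, ?_, ?_⟩
          · intro x
            rw [pvInds_cons, if_neg (by omega)]
            exact hmr x
          · rw [List.nodup_append]
            refine ⟨hnc, by simp, ?_⟩
            intro a ha b hb
            simp only [List.mem_singleton] at hb
            subst hb
            exact fun hEq => hmem (hEq ▸ ha)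
          · intro x
            rw [pvInds_cons, if_pos h1]
            simp only [List.mem_append, List.mem_cons, hmc x]
            tauto
          · have hlen : (rows.length : Int) = (pvCnt 0 qs : Int) := by
              have := pvA_len_row 0 qs hnr hmr
              simpa [PySem.Set.len] using this
            simp only [pvF]
            rw [if_neg (by rintro ⟨hh, -⟩; omega), if_pos ⟨h1, hm⟩, hres, hlen]
      · have hstep : pvAStep n (rows, cols, res) q = (rows, cols, res) := by
          simp [pvAStep, h0, h1]
        rw [hstep]
        refine ⟨hnr, ?_, hnc, ?_, ?_⟩
        · intro x
          rw [pvInds_cons, if_neg (by omega)]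
          exact hmr x
        · intro x
          rw [pvInds_cons, if_neg (by omega)]
          exact hmc x
        · simp only [pvF]
          rw [if_neg (by rintro ⟨hh, -⟩; omega), if_neg (by rintro ⟨hh, -⟩; omega), hres]
          ring

lemma pvA_eq_F (n : Int) (qs : List (Int × Int × Int)) : matrixSumQueries n qs = pvF n qs := by
  unfold matrixSumQueries
  rw [List.foldl_reverse]
  exact (pvA_inv n qs).2.2.2.2

-- ===== B = pvF =====
lemma pv_keys_insert_eq_add (d : PySem.Dict Int Int) (k v : Int) :
    (d.insert k v).keys = PySem.Set.add d.keys k := by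
  by_cases hc : d.contains k = true
  · rw [PySem.Dict.keys_insert_of_contains _ _ hc,
      PySem.Set.add_of_mem ((PySem.Dict.contains_iff_mem_keys _ _).mp hc)]
  · rw [PySem.Dict.keys_insert_of_not_contains _ _ (by simpa using hc),
      PySem.Set.add_of_not_mem
        (fun hm => absurd ((PySem.Dict.contains_iff_mem_keys _ _).mpr hm) (by simpa using hc))]

lemma pvBLast_char (qs : List (Int × Int × Int)) :
    ∀ (k : Int) (dR dC : PySem.Dict Int Int),
    (∀ ind, ((PySem.List.enumerate qs k).foldl pvBLastStep (dR, dC)).1.get? ind =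
      (match pvLast 0 ind qs with | some j => some (k + j) | none => dR.get? ind)) ∧
    (∀ ind, ((PySem.List.enumerate qs k).foldl pvBLastStep (dR, dC)).2.get? ind =
      (match pvLast 1 ind qs with | some j => some (k + j) | none => dC.get? ind)) ∧
    ((PySem.List.enumerate qs k).foldl pvBLastStep (dR, dC)).1.keys
      = PySem.Set.update dR.keys (pvInds 0 qs) ∧
    ((PySem.List.enumerate qs k).foldl pvBLastStep (dR, dC)).2.keys
      = PySem.Set.update dC.keys (pvInds 1 qs) := by
  induction qs with
  | nil =>
    intro k dR dC
    refine ⟨?_, ?_, ?_, ?_⟩ <;> simp [PySem.List.enumerate, pvLast, pvInds, PySem.Set.update]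
  | cons q qs ih =>
    intro k dR dC
    rw [PySem.List.enumerate_cons]
    by_cases h0 : q.1 = 0
    · have hstep : pvBLastStep (dR, dC) (k, q) = (dR.insert q.2.1 k, dC) := by
        simp [pvBLastStep, h0]
      rw [List.foldl_cons, hstep]
      obtain ⟨ihR, ihC, ihKR, ihKC⟩ := ih (k + 1) (dR.insert q.2.1 k) dC
      refine ⟨?_, ?_, ?_, ?_⟩
      · intro ind
        rw [ihR ind]
        rcases h : pvLast 0 ind qs with _ | m
        · simp only [pvLast, h]
          by_cases he : q.2.1 = ind
          · subst he
            simp [h0, PySem.Dict.get?_insert_self]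
          · simp [h0, he, PySem.Dict.get?_insert_of_ne _ _ (Ne.symm he)]
        · simp only [pvLast, h, Option.some.injEq]
          omega
      · intro ind
        rw [ihC ind]
        rcases h : pvLast 1 ind qs with _ | m
        · simp [pvLast, h, h0]
        · simp only [pvLast, h, Option.some.injEq]
          omega
      · rw [ihKR, pvInds_cons, if_pos h0, PySem.Set.update_cons, pv_keys_insert_eq_add]
      · rw [ihKC, pvInds_cons, if_neg (by omega)]
    · by_cases h1 : q.1 = 1
      · have hstep : pvBLastStep (dR, dC) (k, q) = (dR, dC.insert q.2.1 k) := by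
          simp [pvBLastStep, h1]
        rw [List.foldl_cons, hstep]
        obtain ⟨ihR, ihC, ihKR, ihKC⟩ := ih (k + 1) dR (dC.insert q.2.1 k)
        refine ⟨?_, ?_, ?_, ?_⟩
        · intro ind
          rw [ihR ind]
          rcases h : pvLast 0 ind qs with _ | m
          · simp [pvLast, h, (by omega : q.1 ≠ 0)]
          · simp only [pvLast, h, Option.some.injEq]
            omega
        · intro ind
          rw [ihC ind]
          rcases h : pvLast 1 ind qs with _ | m
          · simp only [pvLast, h]
            by_cases he : q.2.1 = ind
            · subst he
              simp [h1, PySem.Dict.get?_insert_self]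
            · simp [h1, he, PySem.Dict.get?_insert_of_ne _ _ (Ne.symm he)]
          · simp only [pvLast, h, Option.some.injEq]
            omega
        · rw [ihKR, pvInds_cons, if_neg (by omega)]
        · rw [ihKC, pvInds_cons, if_pos h1, PySem.Set.update_cons, pv_keys_insert_eq_add]
      · have hstep : pvBLastStep (dR, dC) (k, q) = (dR, dC) := by
          simp [pvBLastStep, h0, h1]
        rw [List.foldl_cons, hstep]
        obtain ⟨ihR, ihC, ihKR, ihKC⟩ := ih (k + 1) dR dC
        refine ⟨?_, ?_, ?_, ?_⟩
        · intro ind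
          rw [ihR ind]
          rcases h : pvLast 0 ind qs with _ | m
          · simp [pvLast, h, h0]
          · simp only [pvLast, h, Option.some.injEq]
            omega
        · intro ind
          rw [ihC ind]
          rcases h : pvLast 1 ind qs with _ | m
          · simp [pvLast, h, h1]
          · simp only [pvLast, h, Option.some.injEq]
            omega
        · rw [ihKR, pvInds_cons, if_neg (by omega)]
        · rw [ihKC, pvInds_cons, if_neg (by omega)]

lemma pvSweep (n NR NC : Int) (dR dC : PySem.Dict Int Int) (qs : List (Int × Int × Int)) :
    ∀ (k res rs cs : Int),
    (∀ ind j, 0 ≤ j → (dR.get? ind = some (k + j) ↔ pvLast 0 ind qs = some j)) →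
    (∀ ind j, 0 ≤ j → (dC.get? ind = some (k + j) ↔ pvLast 1 ind qs = some j)) →
    rs = NR - (pvCnt 0 qs : Int) → cs = NC - (pvCnt 1 qs : Int) →
    (PySem.List.enumerate qs k).foldl (pvBSweepStep n NR NC dR dC) (res, rs, cs)
      = (res + pvF n qs, NR, NC) := by
  induction qs with
  | nil =>
    intro k res rs cs _ _ hrs hcs
    simp only [pvCnt, pvInds, List.filter_nil, List.map_nil] at hrs hcs
    simp only [PySem.List.enumerate, List.foldl_nil, pvF, Prod.mk.injEq]
    refine ⟨by omega, by simp at hrs; omega, by simp at hcs; omega⟩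
  | cons q qs ih =>
    intro k res rs cs HR HC hrs hcs
    rw [PySem.List.enumerate_cons, List.foldl_cons]
    have HR' : ∀ ind j, 0 ≤ j → (dR.get? ind = some (k + 1 + j) ↔ pvLast 0 ind qs = some j) := by
      intro ind j hj
      have h := HR ind (j + 1) (by omega)
      rw [show k + (j + 1) = k + 1 + j by ring] at h
      rw [h, pvLast_cons_succ _ _ _ _ j hj]
    have HC' : ∀ ind j, 0 ≤ j → (dC.get? ind = some (k + 1 + j) ↔ pvLast 1 ind qs = some j) := by
      intro ind j hj
      have h := HC ind (j + 1) (by omega)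
      rw [show k + (j + 1) = k + 1 + j by ring] at h
      rw [h, pvLast_cons_succ _ _ _ _ j hj]
    have key0 : dR.get? q.2.1 = some k ↔ (q.1 = 0 ∧ q.2.1 ∉ pvInds 0 qs) := by
      have h := HR q.2.1 0 le_rfl
      rw [show k + 0 = k by ring] at h
      rw [h, pvLast_cons_zero, pvLast_eq_none_iff]
      tauto
    have key1 : dC.get? q.2.1 = some k ↔ (q.1 = 1 ∧ q.2.1 ∉ pvInds 1 qs) := by
      have h := HC q.2.1 0 le_rfl
      rw [show k + 0 = k by ring] at h
      rw [h, pvLast_cons_zero, pvLast_eq_none_iff]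
      tauto
    by_cases h0 : q.1 = 0
    · by_cases hm : q.2.1 ∈ pvInds 0 qs
      · have hget : dR.get? q.2.1 ≠ some k := fun hh => (key0.mp hh).2 hm
        have hstep : pvBSweepStep n NR NC dR dC (res, rs, cs) (k, q) = (res, rs, cs) := by
          simp [pvBSweepStep, h0, hget]
        rw [hstep]
        have e0 : pvCnt 0 (q :: qs) = pvCnt 0 qs := by
          rw [pvCnt_cons, if_neg (by tauto)]; omega
        have e1 : pvCnt 1 (q :: qs) = pvCnt 1 qs := by
          rw [pvCnt_cons, if_neg (by rintro ⟨hh, -⟩; omega)]; omega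
        rw [ih (k + 1) res rs cs HR' HC' (by rw [hrs, e0]) (by rw [hcs, e1])]
        simp only [Prod.mk.injEq]
        refine ⟨?_, trivial⟩
        simp only [pvF]
        rw [if_neg (by tauto), if_neg (by rintro ⟨hh, -⟩; omega)]
        ring
      · have hget : dR.get? q.2.1 = some k := key0.mpr ⟨h0, hm⟩
        have hstep : pvBSweepStep n NR NC dR dC (res, rs, cs) (k, q)
            = (res + q.2.2 * (n - NC + cs), rs + 1, cs) := by
          simp [pvBSweepStep, h0, hget]
        rw [hstep]
        have e0 : pvCnt 0 (q :: qs) = pvCnt 0 qs + 1 := by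
          rw [pvCnt_cons, if_pos ⟨h0, hm⟩]
        have e1 : pvCnt 1 (q :: qs) = pvCnt 1 qs := by
          rw [pvCnt_cons, if_neg (by rintro ⟨hh, -⟩; omega)]; omega
        rw [ih (k + 1) _ (rs + 1) cs HR' HC'
          (by rw [hrs, e0]; push_cast; ring) (by rw [hcs, e1])]
        have hc : n - NC + cs = n - (pvCnt 1 qs : Int) := by
          rw [hcs, e1]; ring
        simp only [Prod.mk.injEq]
        refine ⟨?_, trivial⟩
        simp only [pvF]
        rw [if_pos ⟨h0, hm⟩, hc]
        ring
    · by_cases h1 : q.1 = 1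
      · by_cases hm : q.2.1 ∈ pvInds 1 qs
        · have hget : dC.get? q.2.1 ≠ some k := fun hh => (key1.mp hh).2 hm
          have hstep : pvBSweepStep n NR NC dR dC (res, rs, cs) (k, q) = (res, rs, cs) := by
            simp [pvBSweepStep, h1, hget]
          rw [hstep]
          have e0 : pvCnt 0 (q :: qs) = pvCnt 0 qs := by
            rw [pvCnt_cons, if_neg (by rintro ⟨hh, -⟩; omega)]; omega
          have e1 : pvCnt 1 (q :: qs) = pvCnt 1 qs := by
            rw [pvCnt_cons, if_neg (by tauto)]; omega
          rw [ih (k + 1) res rs cs HR' HC' (by rw [hrs, e0]) (by rw [hcs, e1])]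
          simp only [Prod.mk.injEq]
          refine ⟨?_, trivial⟩
          simp only [pvF]
          rw [if_neg (by rintro ⟨hh, -⟩; omega), if_neg (by tauto)]
          ring
        · have hget : dC.get? q.2.1 = some k := key1.mpr ⟨h1, hm⟩
          have hstep : pvBSweepStep n NR NC dR dC (res, rs, cs) (k, q)
              = (res + q.2.2 * (n - NR + rs), rs, cs + 1) := by
            simp [pvBSweepStep, h1, hget]
          rw [hstep]
          have e0 : pvCnt 0 (q :: qs) = pvCnt 0 qs := by
            rw [pvCnt_cons, if_neg (by rintro ⟨hh, -⟩; omega)]; omega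
          have e1 : pvCnt 1 (q :: qs) = pvCnt 1 qs + 1 := by
            rw [pvCnt_cons, if_pos ⟨h1, hm⟩]
          rw [ih (k + 1) _ rs (cs + 1) HR' HC'
            (by rw [hrs, e0]) (by rw [hcs, e1]; push_cast; ring)]
          have hc : n - NR + rs = n - (pvCnt 0 qs : Int) := by
            rw [hrs, e0]; ring
          simp only [Prod.mk.injEq]
          refine ⟨?_, trivial⟩
          simp only [pvF]
          rw [if_neg (by rintro ⟨hh, -⟩; omega), if_pos ⟨h1, hm⟩, hc]
          ring
      · have hstep : pvBSweepStep n NR NC dR dC (res, rs, cs) (k, q) = (res, rs, cs) := by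
          simp [pvBSweepStep, h0, h1]
        rw [hstep]
        have e0 : pvCnt 0 (q :: qs) = pvCnt 0 qs := by
          rw [pvCnt_cons, if_neg (by rintro ⟨hh, -⟩; omega)]; omega
        have e1 : pvCnt 1 (q :: qs) = pvCnt 1 qs := by
          rw [pvCnt_cons, if_neg (by rintro ⟨hh, -⟩; omega)]; omega
        rw [ih (k + 1) res rs cs HR' HC' (by rw [hrs, e0]) (by rw [hcs, e1])]
        simp only [Prod.mk.injEq]
        refine ⟨?_, trivial⟩
        simp only [pvF]
        rw [if_neg (by rintro ⟨hh, -⟩; omega), if_neg (by rintro ⟨hh, -⟩; omega)]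
        ring

lemma pvB_eq_F (n : Int) (qs : List (Int × Int × Int)) : matrixSumQueries_alt n qs = pvF n qs := by
  simp only [matrixSumQueries_alt]
  obtain ⟨ihR, ihC, ihKR, ihKC⟩ := pvBLast_char qs 0 PySem.Dict.empty PySem.Dict.empty
  set D := (PySem.List.enumerate qs 0).foldl pvBLastStep (PySem.Dict.empty, PySem.Dict.empty)
    with hD
  have hkR : D.1.keys = PySem.Set.ofList (pvInds 0 qs) := by
    rw [ihKR, PySem.Dict.keys_empty, PySem.Set.update_nil_left]
  have hkC : D.2.keys = PySem.Set.ofList (pvInds 1 qs) := by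
    rw [ihKC, PySem.Dict.keys_empty, PySem.Set.update_nil_left]
  have hszR : (PySem.Dict.size D.1 : Int) = (pvCnt 0 qs : Int) := by
    have h1 : D.1.keys.length = pvCnt 0 qs := by rw [hkR]; rfl
    have h2 : D.1.keys.length = PySem.Dict.size D.1 := by
      simp [PySem.Dict.keys, PySem.Dict.size]
    omega
  have hszC : (PySem.Dict.size D.2 : Int) = (pvCnt 1 qs : Int) := by
    have h1 : D.2.keys.length = pvCnt 1 qs := by rw [hkC]; rfl
    have h2 : D.2.keys.length = PySem.Dict.size D.2 := by
      simp [PySem.Dict.keys, PySem.Dict.size]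
    omega
  have HR : ∀ ind j, 0 ≤ j → (D.1.get? ind = some ((0 : Int) + j) ↔ pvLast 0 ind qs = some j) := by
    intro ind j hj
    rw [ihR ind]
    rcases h : pvLast 0 ind qs with _ | m
    · simp [PySem.Dict.get?_empty]
    · simp
  have HC : ∀ ind j, 0 ≤ j → (D.2.get? ind = some ((0 : Int) + j) ↔ pvLast 1 ind qs = some j) := by
    intro ind j hj
    rw [ihC ind]
    rcases h : pvLast 1 ind qs with _ | m
    · simp [PySem.Dict.get?_empty]
    · simp
  rw [pvSweep n (PySem.Dict.size D.1 : Int) (PySem.Dict.size D.2 : Int) D.1 D.2 qs 0 0 0 0 HR HC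
    (by omega) (by omega)]
  simp

-- ===== VERDICT (by name: the statement is the Claim_ definition above) =====
theorem matrixSumQueries_spec : Claim_equal_matrixSumQueries := by
  intro n queries _
  unfold Spec_matrixSumQueries
  rw [pvA_eq_F, pvB_eq_F]
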